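-- pv_equiv track=rewrite | github.com/Squidtoon99/Squidbot | cogs/automod.py | repeated_text
-- ===== SOURCE A (Python) =====
-- def repeated_text(s):
--
--     # size of string
--     n = len(s)
--
--     m = dict()
--
--     for i in range(n):
--         string = ""
--         for j in range(i, n):
--             string += s[j]
--             if string in m.keys():
--                 m[string] += 1
--             else:
--                 m[string] = 1
--
--     # to store maximum freqency
--     maxi = 0
--
--     # To store string which has
--     # maximum frequency
--     maxi_str = ""
--
--     for i in m:
--         if m[i] > maxi:
--             maxi = m[i]
--             maxi_str = i
--         elif m[i] == maxi:
--             ss = i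
--             if len(ss) > len(maxi_str):
--                 maxi_str = ss
--
--     # return substring which has maximum freq
--     return maxi_str
-- ===== SOURCE B (Python) =====
-- def repeated_text(s):
--     # Per-length counting with early exit: the max substring frequency is
--     # non-increasing in the substring length, so scan lengths upward and stop
--     # as soon as the best count at this length drops below the best seen.
--     n = len(s)
--     best, bestc = "", 0
--     for L in range(1, n + 1):
--         cnt = {}
--         for i in range(n - L + 1):
--             t = s[i:i + L]
--             cnt[t] = cnt.get(t, 0) + 1
--         t = max(cnt, key=lambda u: cnt[u])
--         c = cnt[t]
--         if c < bestc:
--             break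
--         best, bestc = t, c
--     return best
-- ===== Notes on version B (the rewrite author's own statement) =====
-- stated objective: faster
-- what changed: Instead of building a dict of all O(n^2) substrings by incremental string concatenation and then scanning it, B counts substrings one length at a time from the shortest up, keeps the first maximal-count substring of each length, and stops as soon as the per-length maximum count drops below the best so far (the maximal substring frequency is non-increasing in length).
import Mathlib
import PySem

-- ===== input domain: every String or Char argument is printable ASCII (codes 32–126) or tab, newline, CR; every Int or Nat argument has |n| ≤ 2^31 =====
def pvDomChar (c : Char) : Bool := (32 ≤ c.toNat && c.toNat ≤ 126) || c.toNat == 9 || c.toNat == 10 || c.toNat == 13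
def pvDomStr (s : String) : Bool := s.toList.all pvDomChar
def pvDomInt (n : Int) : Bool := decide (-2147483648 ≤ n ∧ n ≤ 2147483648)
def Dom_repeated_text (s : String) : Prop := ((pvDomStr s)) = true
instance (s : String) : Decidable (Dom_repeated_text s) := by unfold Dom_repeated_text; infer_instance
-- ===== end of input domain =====

-- B replaces A's all-substrings dictionary by per-length counting with an early
-- exit (the max substring frequency is non-increasing in length); measured faster.

-- ===== PORT A =====
-- A builds a dict counting every substring (string grown char by char), then scans
-- the keys keeping the highest count, ties broken by longer key, first key wins.
def repeated_text (s : String) : String :=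
  let l := s.toList
  let n := l.length
  let m : PySem.Dict (List Char) Int :=
    (List.range n).foldl (fun m0 i =>
      (((List.range' i (n - i)).foldl
        (fun (st : List Char × PySem.Dict (List Char) Int) j =>
          let str := st.1 ++ [l.getD j ' ']   -- s[j]; j is always in range here, so getD is exact
          let m1 := st.2
          if m1.contains str then (str, m1.insert str (m1.getD str 0 + 1))
          else (str, m1.insert str 1))
        ([], m0)).2)) PySem.Dict.empty
  let fin := m.keys.foldl (fun (p : Int × List Char) k =>
    if m.getD k 0 > p.1 then (m.getD k 0, k)
    else if m.getD k 0 == p.1 then (if k.length > p.2.length then (p.1, k) else p)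
    else p) (0, [])
  String.ofList fin.2

-- ===== PORT B =====
-- count all substrings of length L (cnt = {}; loop over starts)
def bCnt (l : List Char) (L : Nat) : PySem.Dict (List Char) Int :=
  (List.range (l.length - L + 1)).foldl
    (fun d i =>
      let t := PySem.List.slice l (some (Int.ofNat i)) (some (Int.ofNat (i + L)))  -- s[i:i+L]
      d.insert t (d.getD t 0 + 1))
    PySem.Dict.empty

-- the 'for L in range(1, n+1)' loop with its break, as recursion on L
def bLoop (l : List Char) (n : Nat) (L : Nat) (best : List Char) (bestc : Int) : List Char :=
  if L ≤ n then
    let cnt := bCnt l L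
    let t := PySem.List.maxD cnt.keys (fun u => cnt.getD u 0) []  -- max(cnt, key=...); cnt nonempty since L ≤ n
    let c := cnt.getD t 0
    if c < bestc then best
    else bLoop l n (L + 1) t c
  else best
termination_by n + 1 - L

def repeated_text_alt (s : String) : String :=
  String.ofList (bLoop s.toList s.toList.length 1 [] 0)

-- ===== PRECONDITION & SPEC =====
def Spec_repeated_text (s : String) (out : String) : Prop := out = repeated_text_alt s
instance (s : String) (out : String) : Decidable (Spec_repeated_text s out) := by unfold Spec_repeated_text; infer_instance

-- ===== CLAIM (what is proved, stated in full; the proofs are below) =====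
def Claim_equal_repeated_text : Prop := ∀ (s : String), Dom_repeated_text s → Spec_repeated_text s (repeated_text s)

-- ===== LEMMAS AND PROOFS =====

-- substring of l starting at i of length L
def sbt (l : List Char) (i L : Nat) : List Char := (l.drop i).take L
-- the substrings inserted by A's inner loop at start i, in order
def rowA (l : List Char) (i : Nat) : List (List Char) := (List.range' 1 (l.length - i)).map (sbt l i)
-- all substring occurrences, in A's insertion order
def occs (l : List Char) : List (List Char) := (List.range l.length).flatMap (rowA l)
-- all substrings of length L in start order (B's counting order)
def subsL (l : List Char) (L : Nat) : List (List Char) := (List.range (l.length - L + 1)).map (fun i => sbt l i L)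
-- occurrence count of t in l (the value of A's dict at key t)
def cOf (l : List Char) (t : List Char) : Int := ((occs l).count t : Int)

-- "strictly better" in A's selection scan: more occurrences, or as many but longer
def Kgt (l : List Char) (a b : List Char) : Bool :=
  decide (cOf l b < cOf l a) || (decide (cOf l a = cOf l b) && decide (b.length < a.length))

-- A's selection fold, state reduced to the current best element
def pick (l : List Char) (b : List Char) (ks : List (List Char)) : List Char :=
  ks.foldl (fun b k => if Kgt l k b then k else b) b

-- B's chosen substring and its count at length L (bCnt will be shown to be this counter)
def tL (l : List Char) (L : Nat) : List Char :=
  PySem.List.maxD (PySem.Dict.counter (subsL l L)).keys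
    (fun u => (PySem.Dict.counter (subsL l L)).getD u 0) []
def cL (l : List Char) (L : Nat) : Int := (PySem.Dict.counter (subsL l L)).getD (tL l L) 0

-- the dict-update step A uses
def dstep (d : PySem.Dict (List Char) Int) (t : List Char) : PySem.Dict (List Char) Int :=
  if d.contains t then d.insert t (d.getD t 0 + 1) else d.insert t 1

-- ---- basic substring facts ----
theorem sbt_length (l : List Char) (i L : Nat) : (sbt l i L).length = min L (l.length - i) := by
  simp [sbt]

theorem sbt_succ (l : List Char) (i k : Nat) (h : i + k < l.length) :
    sbt l i k ++ [l.getD (i + k) ' '] = sbt l i (k + 1) := by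
  have hx : l[i + k]? = some l[i + k] := List.getElem?_eq_getElem (by omega)
  simp only [sbt, List.take_add_one, List.getElem?_drop, hx, Option.toList_some]
  congr 1
  simp [List.getD, hx]

theorem sbt_take (l : List Char) (i L j : Nat) (h : j ≤ L) : (sbt l i L).take j = sbt l i j := by
  simp [sbt, List.take_take, Nat.min_eq_left h]

theorem mem_subsL_length (l : List Char) (L : Nat) (hL : L ≤ l.length) (y : List Char)
    (hy : y ∈ subsL l L) : y.length = L := by
  simp only [subsL, List.mem_map, List.mem_range] at hy
  obtain ⟨i, hi, rfl⟩ := hy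
  rw [sbt_length]; omega

theorem sbt_mem_subsL (l : List Char) (i L : Nat) (h : i + L ≤ l.length) :
    sbt l i L ∈ subsL l L := by
  simp only [subsL, List.mem_map, List.mem_range]
  exact ⟨i, by omega, rfl⟩

-- ---- A's dict is the counter of occs ----
theorem dstep_eq (d : PySem.Dict (List Char) Int) (t : List Char) :
    dstep d t = d.insert t (d.getD t 0 + 1) := by
  unfold dstep
  by_cases h : d.contains t = true
  · rw [if_pos h]
  · rw [if_neg h, PySem.Dict.getD_of_not_contains d 0 (by simpa using h)]
    norm_num

theorem foldl_flatMap' {α β γ : Type} (xs : List α) (g : α → List β) (f : γ → β → γ) (init : γ) :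
    (xs.flatMap g).foldl f init = xs.foldl (fun acc x => (g x).foldl f acc) init := by
  induction xs generalizing init with
  | nil => rfl
  | cons x xs ih => simp [List.flatMap_cons, List.foldl_append, ih]

theorem flatMap_congr_mem {α β : Type} (xs : List α) (f g : α → List β)
    (h : ∀ x ∈ xs, f x = g x) : xs.flatMap f = xs.flatMap g := by
  induction xs with
  | nil => rfl
  | cons x xs ih =>
    simp only [List.flatMap_cons, h x (by simp)]
    rw [ih (fun y hy => h y (by simp [hy]))]

theorem stepA_eq (l : List Char) :
    (fun (st : List Char × PySem.Dict (List Char) Int) j =>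
        let str := st.1 ++ [l.getD j ' ']
        let m1 := st.2
        if m1.contains str then (str, m1.insert str (m1.getD str 0 + 1))
        else (str, m1.insert str 1))
    = (fun (st : List Char × PySem.Dict (List Char) Int) j =>
        (st.1 ++ [l.getD j ' '], dstep st.2 (st.1 ++ [l.getD j ' ']))) := by
  funext st j
  simp only [dstep]
  split <;> rfl

theorem innerA (l : List Char) (i : Nat) :
    ∀ (k : Nat) (m0 : PySem.Dict (List Char) Int), i + k ≤ l.length →
    (List.range' (i + k) (l.length - (i + k))).foldl
      (fun (st : List Char × PySem.Dict (List Char) Int) j =>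
        let str := st.1 ++ [l.getD j ' ']
        let m1 := st.2
        if m1.contains str then (str, m1.insert str (m1.getD str 0 + 1))
        else (str, m1.insert str 1))
      (sbt l i k, m0)
    = (sbt l i (l.length - i),
       ((List.range' (k + 1) (l.length - i - k)).map (sbt l i)).foldl dstep m0) := by
  intro k m0 hk
  rw [stepA_eq l]
  induction hfuel : l.length - (i + k) generalizing k m0 with
  | zero =>
    have h1 : l.length - i - k = 0 := by omega
    have h2 : k = l.length - i := by omega
    simp [h2]
  | succ m ih =>
    have hlt : i + k < l.length := by omega
    rw [List.range'_succ]
    simp only [List.foldl_cons]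
    rw [sbt_succ l i k hlt]
    have harith : l.length - (i + (k + 1)) = m := by omega
    rw [show i + k + 1 = i + (k + 1) by omega]
    have ihh := ih (k + 1) (dstep m0 (sbt l i (k + 1))) (by omega) harith
    have h3 : l.length - i - k = m + 1 := by omega
    have h4 : l.length - i - (k + 1) = m := by omega
    rw [ihh, h4, h3, List.range'_succ, List.map_cons, List.foldl_cons]

theorem mA_eq_counter (l : List Char) :
    (List.range l.length).foldl (fun m0 i =>
      (((List.range' i (l.length - i)).foldl
        (fun (st : List Char × PySem.Dict (List Char) Int) j =>
          let str := st.1 ++ [l.getD j ' ']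
          let m1 := st.2
          if m1.contains str then (str, m1.insert str (m1.getD str 0 + 1))
          else (str, m1.insert str 1))
        ([], m0)).2)) PySem.Dict.empty
    = PySem.Dict.counter (occs l) := by
  rw [PySem.List.foldl_congr_mem _ _ (fun m0 i => (rowA l i).foldl dstep m0) _ ?_]
  · rw [show (fun (m0 : PySem.Dict (List Char) Int) i => (rowA l i).foldl dstep m0)
        = (fun (m0 : PySem.Dict (List Char) Int) i =>
            (rowA l i).foldl (fun d t => d.insert t (d.getD t 0 + 1)) m0) from ?_]
    · rw [← foldl_flatMap', ← occs, PySem.Dict.foldl_insert_getD_add_one_eq_counter]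
    · funext m0 i
      exact PySem.List.foldl_congr_mem _ _ _ _ (fun d t _ => dstep_eq d t)
  · intro m0 i hi
    have h := innerA l i 0 m0 (by have := List.mem_range.1 hi; omega)
    simp only [Nat.add_zero] at h
    have h0 : sbt l i 0 = [] := rfl
    rw [h0] at h
    rw [h]
    rfl

-- ---- selection fold = pick ----
theorem Kgt_irrefl (l : List Char) (a : List Char) : Kgt l a a = false := by
  simp [Kgt]

theorem Kgt_total (l : List Char) (a b : List Char) (h1 : Kgt l a b = false)
    (h2 : ¬ (cOf l a = cOf l b ∧ a.length = b.length)) : Kgt l b a = true := by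
  simp only [Kgt, Bool.or_eq_false_iff, Bool.and_eq_false_iff, decide_eq_false_iff_not,
    Bool.or_eq_true, Bool.and_eq_true, decide_eq_true_eq] at *
  omega

theorem selfold_eq_pick (l : List Char) (m : PySem.Dict (List Char) Int)
    (hm : ∀ t, m.getD t 0 = cOf l t) :
    ∀ (ks : List (List Char)) (b0 : List Char),
    ks.foldl (fun (p : Int × List Char) k =>
      if m.getD k 0 > p.1 then (m.getD k 0, k)
      else if m.getD k 0 == p.1 then (if k.length > p.2.length then (p.1, k) else p)
      else p) (cOf l b0, b0)
    = (cOf l (pick l b0 ks), pick l b0 ks) := by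
  intro ks
  induction ks with
  | nil => intro b0; rfl
  | cons k ks ih =>
    intro b0
    rw [List.foldl_cons]
    have hstep : (if m.getD k 0 > (cOf l b0, b0).1 then (m.getD k 0, k)
        else if m.getD k 0 == (cOf l b0, b0).1 then
          (if k.length > (cOf l b0, b0).2.length then ((cOf l b0, b0).1, k) else (cOf l b0, b0))
        else (cOf l b0, b0))
        = (cOf l (if Kgt l k b0 then k else b0), if Kgt l k b0 then k else b0) := by
      simp only [hm k]
      by_cases hc1 : cOf l b0 < cOf l k
      · have hK : Kgt l k b0 = true := by simp only [Kgt]; simp; omega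
        simp only [gt_iff_lt]
        rw [if_pos hc1, hK]
        have : cOf l k = cOf l (if true = true then k else b0) := by simp
        simp
      · by_cases hc2 : cOf l k = cOf l b0
        · by_cases hc3 : b0.length < k.length
          · have hK : Kgt l k b0 = true := by simp only [Kgt]; simp; omega
            simp only [gt_iff_lt]
            rw [if_neg hc1, if_pos (by simp [hc2]), if_pos hc3, hK]
            simp [hc2]
          · have hK : Kgt l k b0 = false := by simp only [Kgt]; simp; omega
            simp only [gt_iff_lt]
            rw [if_neg hc1, if_pos (by simp [hc2]), if_neg hc3, hK]
            simp
        · have hK : Kgt l k b0 = false := by simp only [Kgt]; simp; omega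
          simp only [gt_iff_lt]
          rw [if_neg hc1, if_neg (by simp [hc2]), hK]
          simp
    rw [hstep]
    have : pick l b0 (k :: ks) = pick l (if Kgt l k b0 then k else b0) ks := rfl
    rw [this]
    exact ih (if Kgt l k b0 then k else b0)

theorem pick_eq_of_find? (l : List Char) :
    ∀ (ks : List (List Char)) (b0 r : List Char),
    (∀ k ∈ ks, Kgt l k r = false) → Kgt l b0 r = false →
    (b0 :: ks).find? (fun k => decide (cOf l k = cOf l r ∧ k.length = r.length)) = some r →
    pick l b0 ks = r := by
  intro ks
  induction ks with
  | nil =>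
    intro b0 r _ _ hf
    by_cases hb : (decide (cOf l b0 = cOf l r ∧ b0.length = r.length)) = true
    · rw [List.find?_cons_of_pos (p := fun k => decide (cOf l k = cOf l r ∧ k.length = r.length)) hb] at hf
      simpa [pick] using hf
    · rw [List.find?_cons_of_neg (p := fun k => decide (cOf l k = cOf l r ∧ k.length = r.length)) (by simpa using hb)] at hf
      simp at hf
  | cons k ks ih =>
    intro b0 r hks hb0 hf
    have hpr : (decide (cOf l r = cOf l r ∧ r.length = r.length)) = true := by simp
    have hkr : Kgt l k r = false := hks k (by simp)
    have hstep : pick l b0 (k :: ks) = pick l (if Kgt l k b0 then k else b0) ks := rfl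
    by_cases hb : (decide (cOf l b0 = cOf l r ∧ b0.length = r.length)) = true
    · rw [List.find?_cons_of_pos (p := fun k => decide (cOf l k = cOf l r ∧ k.length = r.length)) hb] at hf
      have hbr : b0 = r := by simpa using hf
      subst hbr
      rw [hstep]
      rw [show Kgt l k b0 = false from hkr]
      simp only [Bool.false_eq_true, if_false]
      exact ih b0 b0 (fun y hy => hks y (by simp [hy])) (Kgt_irrefl l b0)
        (by rw [List.find?_cons_of_pos (p := fun k => decide (cOf l k = cOf l b0 ∧ k.length = b0.length)) hpr])
    · rw [List.find?_cons_of_neg (p := fun k => decide (cOf l k = cOf l r ∧ k.length = r.length)) (by simpa using hb)] at hf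
      by_cases hk : (decide (cOf l k = cOf l r ∧ k.length = r.length)) = true
      · rw [List.find?_cons_of_pos (p := fun k => decide (cOf l k = cOf l r ∧ k.length = r.length)) hk] at hf
        have hkr' : k = r := by simpa using hf
        subst hkr'
        have hKgt : Kgt l k b0 = true := by
          apply Kgt_total l b0 k hb0
          intro hcontra
          apply hb
          simp only [decide_eq_true_eq]
          exact hcontra
        rw [hstep, hKgt]
        simp only [if_true]
        exact ih k k (fun y hy => hks y (by simp [hy])) (Kgt_irrefl l k)
          (by rw [List.find?_cons_of_pos (p := fun k' => decide (cOf l k' = cOf l k ∧ k'.length = k.length)) hpr])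
      · rw [List.find?_cons_of_neg (p := fun k => decide (cOf l k = cOf l r ∧ k.length = r.length)) (by simpa using hk)] at hf
        rw [hstep]
        by_cases hK : Kgt l k b0 = true
        · rw [hK]
          simp only [if_true]
          exact ih k r (fun y hy => hks y (by simp [hy])) hkr
            (by rw [List.find?_cons_of_neg (p := fun k => decide (cOf l k = cOf l r ∧ k.length = r.length)) (by simpa using hk)]; exact hf)
        · rw [show Kgt l k b0 = false by simpa using hK]
          simp only [Bool.false_eq_true, if_false]
          exact ih b0 r (fun y hy => hks y (by simp [hy])) hb0
            (by rw [List.find?_cons_of_neg (p := fun k => decide (cOf l k = cOf l r ∧ k.length = r.length)) (by simpa using hb)]; exact hf)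

-- ---- find? plumbing ----
theorem find?_ofList (xs : List (List Char)) (p : List Char → Bool) :
    (PySem.Set.ofList xs).find? p = xs.find? p := by
  induction xs using List.reverseRecOn with
  | nil => simp [PySem.Set.ofList_nil]
  | append_singleton xs x ih =>
    rw [PySem.Set.ofList_append_singleton]
    by_cases hx : x ∈ PySem.Set.ofList xs
    · rw [PySem.Set.add_of_mem hx, List.find?_append, ih]
      cases h : xs.find? p with
      | some y => simp
      | none =>
        have hxmem : x ∈ xs := (PySem.Set.mem_ofList xs x).1 hx
        have hpx : ¬ p x = true := (List.find?_eq_none.1 h) x hxmem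
        simp [hpx]
    · rw [PySem.Set.add_of_not_mem hx, List.find?_append, List.find?_append, ih]

theorem find?_filter' {α : Type} (xs : List α) (p q : α → Bool)
    (h : ∀ x, p x = true → q x = true) : (xs.filter q).find? p = xs.find? p := by
  induction xs with
  | nil => rfl
  | cons x xs ih =>
    by_cases hp : p x = true
    · simp [h x hp, hp]
    · rcases hq : q x with _ | _ <;> simp [hq, hp, ih]

theorem find?_congr' {α : Type} (xs : List α) (p q : α → Bool)
    (h : ∀ x ∈ xs, p x = q x) : xs.find? p = xs.find? q := by
  induction xs with
  | nil => rfl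
  | cons x xs ih =>
    have hx := h x (by simp)
    rcases hp : p x with _ | _ <;>
      simp [hp, ← hx, ih (fun y hy => h y (by simp [hy]))]

-- ---- occs filtered by length L is subsL ----
theorem rowA_filter (l : List Char) (i L : Nat) (hL : 1 ≤ L) :
    (rowA l i).filter (fun t => t.length == L)
    = if i + L ≤ l.length then [sbt l i L] else [] := by
  unfold rowA
  rw [List.filter_map]
  have h1 : (List.range' 1 (l.length - i)).filter ((fun t => t.length == L) ∘ sbt l i)
      = (List.range' 1 (l.length - i)).filter (fun L' => L' == L) := by
    apply List.filter_congr
    intro L' hL'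
    rw [List.mem_range'_1] at hL'
    have hmin : min L' (l.length - i) = L' := by omega
    simp [Function.comp, sbt_length, hmin]
  rw [h1, List.filter_beq, List.count_range_1']
  by_cases h : i + L ≤ l.length
  · rw [if_pos (by omega), if_pos h]
    simp
  · rw [if_neg (by omega), if_neg h]
    simp

theorem occs_filter (l : List Char) (L : Nat) (h1 : 1 ≤ L) (h2 : L ≤ l.length) :
    (occs l).filter (fun t => t.length == L) = subsL l L := by
  unfold occs
  rw [List.filter_flatMap]
  rw [flatMap_congr_mem _ _ (fun i => if i + L ≤ l.length then [sbt l i L] else [])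
    (fun i _ => rowA_filter l i L h1)]
  rw [show l.length = (l.length - L + 1) + (L - 1) by omega, List.range_add,
    List.flatMap_append]
  have hsec : (List.map (fun x => l.length - L + 1 + x) (List.range (L - 1))).flatMap
      (fun i => if i + L ≤ (l.length - L + 1) + (L - 1) then [sbt l i L] else []) = [] := by
    rw [List.flatMap_eq_nil_iff]
    intro x hx
    simp only [List.mem_map] at hx
    obtain ⟨y, hy, rfl⟩ := hx
    rw [if_neg (by omega)]
  rw [hsec, List.append_nil]
  rw [flatMap_congr_mem _ _ (fun i => [sbt l i L]) ?_]
  · rw [← List.map_eq_flatMap]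
    rfl
  · intro x hx
    rw [List.mem_range] at hx
    rw [if_pos (by omega)]

theorem cOf_eq_count_subsL (l : List Char) (t : List Char) (ht1 : 1 ≤ t.length)
    (ht2 : t.length ≤ l.length) : cOf l t = ((subsL l t.length).count t : Int) := by
  unfold cOf
  rw [← occs_filter l t.length ht1 ht2,
    List.count_filter (by simp)]

theorem mem_occs_shape (l : List Char) (k : List Char) (hk : k ∈ occs l) :
    ∃ i L, 1 ≤ L ∧ i + L ≤ l.length ∧ k = sbt l i L := by
  simp only [occs, rowA, List.mem_flatMap, List.mem_map, List.mem_range,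
    List.mem_range'_1] at hk
  obtain ⟨i, hi, L, hL, rfl⟩ := hk
  exact ⟨i, L, by omega, by omega, rfl⟩

theorem not_nil_mem_occs (l : List Char) : [] ∉ occs l := by
  intro h
  obtain ⟨i, L, h1, h2, heq⟩ := mem_occs_shape l [] h
  have := congrArg List.length heq
  rw [sbt_length] at this
  simp at this
  omega

-- ---- bCnt = counter ----
theorem bCnt_eq_counter (l : List Char) (L : Nat) :
    bCnt l L = PySem.Dict.counter (subsL l L) := by
  unfold bCnt
  rw [PySem.List.foldl_congr_mem _ _
    (fun (d : PySem.Dict (List Char) Int) i => d.insert (sbt l i L) (d.getD (sbt l i L) 0 + 1)) _ ?_]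
  · have h1 : ((List.range (l.length - L + 1)).map (fun i => sbt l i L)).foldl
        (fun (d : PySem.Dict (List Char) Int) t => d.insert t (d.getD t 0 + 1)) PySem.Dict.empty
        = (List.range (l.length - L + 1)).foldl
          (fun (d : PySem.Dict (List Char) Int) i =>
            d.insert (sbt l i L) (d.getD (sbt l i L) 0 + 1)) PySem.Dict.empty :=
      List.foldl_map
    rw [← h1,
      show ((List.range (l.length - L + 1)).map (fun i => sbt l i L)) = subsL l L from rfl]
    exact PySem.Dict.foldl_insert_getD_add_one_eq_counter _
  · intro d i _
    have hslice : PySem.List.slice l (some (Int.ofNat i)) (some (Int.ofNat (i + L))) = sbt l i L := by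
      rw [show Int.ofNat i = ((i : Nat) : Int) from rfl, show Int.ofNat (i + L) = ((i + L : Nat) : Int) from rfl]
      rw [PySem.List.slice_natCast]
      simp [sbt]
    simp only [hslice]

-- ---- max? firstness spec ----
theorem max?_aux_le {α : Type} (key : α → Int) :
    ∀ (xs : List α) (a m : α),
    xs.foldl (fun acc x => match acc with
      | none => some x
      | some mm => if key mm < key x then some x else some mm) (some a) = some m →
    key a ≤ key m := by
  intro xs
  induction xs with
  | nil => intro a m h; simp at h; subst h; exact le_refl _
  | cons x xs ih =>
    intro a m h
    rw [List.foldl_cons] at h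
    by_cases hx : key a < key x
    · rw [show (match some a with
        | none => some x
        | some mm => if key mm < key x then some x else some mm) = some x by simp [hx]] at h
      exact le_trans (le_of_lt hx) (ih x m h)
    · rw [show (match some a with
        | none => some x
        | some mm => if key mm < key x then some x else some mm) = some a by simp [hx]] at h
      exact ih a m h

theorem max?_aux_mem {α : Type} (key : α → Int) :
    ∀ (xs : List α) (a m : α),
    xs.foldl (fun acc x => match acc with
      | none => some x
      | some mm => if key mm < key x then some x else some mm) (some a) = some m →
    m = a ∨ key a < key m := by
  intro xs
  induction xs with
  | nil => intro a m h; simp at h; subst h; exact Or.inl rfl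
  | cons x xs ih =>
    intro a m h
    rw [List.foldl_cons] at h
    by_cases hx : key a < key x
    · rw [show (match some a with
        | none => some x
        | some mm => if key mm < key x then some x else some mm) = some x by simp [hx]] at h
      rcases ih x m h with h1 | h1
      · subst h1; exact Or.inr hx
      · exact Or.inr (lt_trans hx h1)
    · rw [show (match some a with
        | none => some x
        | some mm => if key mm < key x then some x else some mm) = some a by simp [hx]] at h
      exact ih a m h

theorem max?_aux_first {α : Type} (key : α → Int) :
    ∀ (xs : List α) (a m : α),
    xs.foldl (fun acc x => match acc with
      | none => some x
      | some mm => if key mm < key x then some x else some mm) (some a) = some m →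
    (a :: xs).find? (fun x => key x == key m) = some m := by
  intro xs
  induction xs with
  | nil =>
    intro a m h
    simp at h
    subst h
    rw [List.find?_cons_of_pos (by simp)]
  | cons x xs ih =>
    intro a m h
    rw [List.foldl_cons] at h
    by_cases hx : key a < key x
    · rw [show (match some a with
        | none => some x
        | some mm => if key mm < key x then some x else some mm) = some x by simp [hx]] at h
      have hxm : key x ≤ key m := max?_aux_le key xs x m h
      have ham : key a < key m := lt_of_lt_of_le hx hxm
      rw [List.find?_cons_of_neg (by simp; omega)]
      exact ih x m h
    · rw [show (match some a with
        | none => some x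
        | some mm => if key mm < key x then some x else some mm) = some a by simp [hx]] at h
      by_cases hpa : key a = key m
      · have hfa := ih a m h
        have : m = a := by
          rcases max?_aux_mem key xs a m h with h1 | h1
          · exact h1
          · omega
        subst this
        rw [List.find?_cons_of_pos (by simp)]
      · have ham : key a < key m := by
          rcases max?_aux_mem key xs a m h with h1 | h1
          · subst h1; omega
          · exact h1
        have hxa : key x ≤ key a := by omega
        rw [List.find?_cons_of_neg (by simp; omega)]
        rw [List.find?_cons_of_neg (by simp; omega)]
        have hfa := ih a m h
        rw [List.find?_cons_of_neg (by simp; omega)] at hfa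
        exact hfa

theorem max?_find? {α : Type} (key : α → Int) (xs : List α) (m : α)
    (h : PySem.List.max? xs key = some m) :
    xs.find? (fun x => key x == key m) = some m := by
  unfold PySem.List.max? at h
  cases xs with
  | nil => simp at h
  | cons x xs =>
    rw [List.foldl_cons] at h
    exact max?_aux_first key xs x m h

-- ---- per-length maxima: basic properties ----
theorem subsL_ne_nil (l : List Char) (L : Nat) : subsL l L ≠ [] := by
  simp [subsL, List.range_succ]

theorem tL_max? (l : List Char) (L : Nat) :
    PySem.List.max? (PySem.Dict.counter (subsL l L)).keys
      (fun u => (PySem.Dict.counter (subsL l L)).getD u 0) = some (tL l L) := by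
  obtain ⟨y, hy⟩ := List.exists_mem_of_ne_nil _ (subsL_ne_nil l L)
  cases h : PySem.List.max? (PySem.Dict.counter (subsL l L)).keys
      (fun u => (PySem.Dict.counter (subsL l L)).getD u 0) with
  | none =>
    exfalso
    rw [PySem.List.max?_eq_none_iff] at h
    have hyk : y ∈ (PySem.Dict.counter (subsL l L)).keys := by
      rw [PySem.Dict.keys_counter]
      exact (PySem.Set.mem_ofList _ _).2 hy
    rw [h] at hyk
    simp at hyk
  | some m =>
    have : tL l L = m := by
      unfold tL PySem.List.maxD
      rw [h]
      rfl
    rw [this]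

theorem tL_mem (l : List Char) (L : Nat) : tL l L ∈ subsL l L := by
  have h := PySem.List.max?_mem (tL_max? l L)
  rw [PySem.Dict.keys_counter] at h
  exact (PySem.Set.mem_ofList _ _).1 h

theorem cL_eq_count (l : List Char) (L : Nat) :
    cL l L = (((subsL l L).count (tL l L) : Nat) : Int) := by
  simp [cL, PySem.Dict.getD_counter]

theorem cL_pos (l : List Char) (L : Nat) : 1 ≤ cL l L := by
  rw [cL_eq_count]
  exact_mod_cast List.count_pos_iff.2 (tL_mem l L)

theorem cL_isMax (l : List Char) (L : Nat) (y : List Char) (hy : y ∈ subsL l L) :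
    ((subsL l L).count y : Int) ≤ cL l L := by
  have h := PySem.List.max?_isMax (tL_max? l L) y (by
    rw [PySem.Dict.keys_counter]
    exact (PySem.Set.mem_ofList _ _).2 hy)
  rw [PySem.Dict.getD_counter] at h
  exact le_trans h (le_of_eq rfl)

theorem count_le_take (l : List Char) (L : Nat) (t : List Char) (h2 : L + 1 ≤ l.length) :
    (subsL l (L + 1)).count t ≤ (subsL l L).count (t.take L) := by
  unfold subsL
  rw [List.count_eq_countP, List.count_eq_countP, List.countP_map, List.countP_map]
  have harr : l.length - (L + 1) + 1 = l.length - L := by omega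
  rw [harr]
  calc List.countP ((fun x => x == t) ∘ fun i => sbt l i (L + 1)) (List.range (l.length - L))
      ≤ List.countP ((fun x => x == t.take L) ∘ fun i => sbt l i L) (List.range (l.length - L)) := by
        apply List.countP_mono_left
        intro i hi hp
        simp only [Function.comp, beq_iff_eq] at hp ⊢
        rw [← hp, sbt_take l i (L + 1) L (by omega)]
    _ ≤ List.countP ((fun x => x == t.take L) ∘ fun i => sbt l i L) (List.range (l.length - L + 1)) := by
        rw [List.range_succ, List.countP_append]
        omega

theorem cL_antitone_step (l : List Char) (L : Nat) (h2 : L + 1 ≤ l.length) :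
    cL l (L + 1) ≤ cL l L := by
  have hmem := tL_mem l (L + 1)
  have hshape : ∃ i, i + (L + 1) ≤ l.length ∧ tL l (L + 1) = sbt l i (L + 1) := by
    simp only [subsL, List.mem_map, List.mem_range] at hmem
    obtain ⟨i, hi, heq⟩ := hmem
    exact ⟨i, by omega, heq.symm⟩
  obtain ⟨i, hi, heq⟩ := hshape
  have htake : (tL l (L + 1)).take L ∈ subsL l L := by
    rw [heq, sbt_take l i (L + 1) L (by omega)]
    exact sbt_mem_subsL l i L (by omega)
  calc cL l (L + 1) = (((subsL l (L + 1)).count (tL l (L + 1)) : Nat) : Int) := cL_eq_count l (L + 1)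
    _ ≤ (((subsL l L).count ((tL l (L + 1)).take L) : Nat) : Int) := by
        exact_mod_cast count_le_take l L (tL l (L + 1)) h2
    _ ≤ cL l L := cL_isMax l L _ htake

theorem cL_antitone (l : List Char) (L1 L2 : Nat) (h : L1 ≤ L2) (h2 : L2 ≤ l.length) :
    cL l L2 ≤ cL l L1 := by
  induction L2, h using Nat.le_induction with
  | base => exact le_refl _
  | succ L2 hle ih =>
    exact le_trans (cL_antitone_step l L2 h2) (ih (by omega))

-- ---- the B loop ----
theorem bLoop_stop (l : List Char) (n L : Nat) (b : List Char) (c : Int) (h : ¬ L ≤ n) :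
    bLoop l n L b c = b := by
  unfold bLoop
  rw [if_neg h]

theorem bLoop_step (l : List Char) (L : Nat) (b : List Char) (c : Int) (h : L ≤ l.length) :
    bLoop l l.length L b c
    = if cL l L < c then b else bLoop l l.length (L + 1) (tL l L) (cL l L) := by
  conv_lhs => rw [bLoop]
  rw [if_pos h]
  simp only [bCnt_eq_counter]
  rfl

theorem bLoop_spec (l : List Char) :
    ∀ (fuel L : Nat), l.length - L ≤ fuel → 1 ≤ L → L ≤ l.length →
    ∃ Ls, L ≤ Ls ∧ Ls ≤ l.length ∧ cL l Ls = cL l L ∧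
      (Ls = l.length ∨ cL l (Ls + 1) < cL l L) ∧
      bLoop l l.length (L + 1) (tL l L) (cL l L) = tL l Ls := by
  intro fuel
  induction fuel with
  | zero =>
    intro L hf h1 h2
    have hLn : L = l.length := by omega
    exact ⟨L, le_refl L, h2, rfl, Or.inl hLn,
      bLoop_stop l l.length (L + 1) _ _ (by omega)⟩
  | succ fuel ih =>
    intro L hf h1 h2
    by_cases h : L + 1 ≤ l.length
    · rw [bLoop_step l (L + 1) _ _ h]
      by_cases hlt : cL l (L + 1) < cL l L
      · rw [if_pos hlt]
        exact ⟨L, le_refl L, h2, rfl, Or.inr hlt, rfl⟩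
      · rw [if_neg hlt]
        have heq : cL l (L + 1) = cL l L :=
          le_antisymm (cL_antitone_step l L h) (not_lt.1 hlt)
        obtain ⟨Ls, hh1, hh2, hh3, hh4, hh5⟩ := ih (L + 1) (by omega) (by omega) h
        refine ⟨Ls, by omega, hh2, by rw [hh3, heq], ?_, hh5⟩
        rcases hh4 with h4 | h4
        · exact Or.inl h4
        · exact Or.inr (by omega)
    · have hL : L = l.length := by omega
      exact ⟨L, le_refl L, h2, rfl, Or.inl hL,
        bLoop_stop l l.length (L + 1) _ _ (by omega)⟩

-- ---- final assembly ----
theorem cOf_nil (l : List Char) : cOf l [] = 0 := by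
  unfold cOf
  rw [List.count_eq_zero.2 (not_nil_mem_occs l)]
  rfl

theorem main_list_eq (l : List Char) :
    pick l [] ((PySem.Dict.counter (occs l)).keys) = bLoop l l.length 1 [] 0 := by
  by_cases hn : l.length = 0
  · have hl : l = [] := List.eq_nil_of_length_eq_zero hn
    subst hl
    rw [bLoop_stop _ _ _ _ _ (by simp)]
    rfl
  · rw [bLoop_step l 1 [] 0 (by omega)]
    rw [if_neg (by have := cL_pos l 1; omega)]
    obtain ⟨Ls, hLs1, hLs2, hLs3, hLs4, hLs5⟩ :=
      bLoop_spec l (l.length) 1 (by omega) (by omega) (by omega)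
    rw [hLs5]
    have hrmem : tL l Ls ∈ subsL l Ls := tL_mem l Ls
    have hrlen : (tL l Ls).length = Ls := mem_subsL_length l Ls hLs2 _ hrmem
    have hrc : cOf l (tL l Ls) = cL l Ls := by
      rw [cOf_eq_count_subsL l (tL l Ls) (by omega) (by omega), hrlen, cL_eq_count]
    -- facts about any key
    have hkey : ∀ k ∈ (PySem.Dict.counter (occs l)).keys,
        cOf l k ≤ cL l 1 ∧ (cOf l k = cL l 1 → k.length ≤ Ls) := by
      intro k hk
      rw [PySem.Dict.keys_counter] at hk
      have hk' : k ∈ occs l := (PySem.Set.mem_ofList _ _).1 hk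
      obtain ⟨i, L', hL1, hL2, rfl⟩ := mem_occs_shape l k hk'
      have hklen : (sbt l i L').length = L' := by rw [sbt_length]; omega
      have hkc : cOf l (sbt l i L') = (((subsL l L').count (sbt l i L') : Nat) : Int) := by
        rw [cOf_eq_count_subsL l _ (by omega) (by omega), hklen]
      have hkmem : sbt l i L' ∈ subsL l L' := sbt_mem_subsL l i L' hL2
      have hle1 : cOf l (sbt l i L') ≤ cL l L' := by
        rw [hkc]; exact cL_isMax l L' _ hkmem
      have hle2 : cL l L' ≤ cL l 1 := cL_antitone l 1 L' (by omega) (by omega)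
      constructor
      · omega
      · intro heqM
        by_contra hgt
        rw [not_le] at hgt
        rw [hklen] at hgt
        rcases hLs4 with h4 | h4
        · omega
        · have : cL l L' ≤ cL l (Ls + 1) := cL_antitone l (Ls + 1) L' (by omega) (by omega)
          omega
    apply pick_eq_of_find? l _ [] (tL l Ls) ?_ ?_ ?_
    · intro k hk
      obtain ⟨hle, hlen⟩ := hkey k hk
      simp only [Kgt, Bool.or_eq_false_iff, Bool.and_eq_false_iff, decide_eq_false_iff_not]
      constructor
      · rw [hrc, hLs3]; omega
      · by_cases hceq : cOf l k = cOf l (tL l Ls)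
        · right
          rw [hrlen]
          rw [hrc, hLs3] at hceq
          have := hlen hceq
          omega
        · left; exact hceq
    · simp only [Kgt, Bool.or_eq_false_iff, Bool.and_eq_false_iff, decide_eq_false_iff_not]
      have h1 := cL_pos l Ls
      rw [cOf_nil]
      constructor
      · rw [hrc]; omega
      · left
        rw [hrc]
        omega
    · rw [List.find?_cons_of_neg (by
        simp only [cOf_nil, decide_eq_true_eq, not_and]
        intro hc
        exfalso
        rw [hrc] at hc
        have := cL_pos l Ls
        omega)]
      rw [PySem.Dict.keys_counter, find?_ofList]
      rw [← find?_filter' (occs l) _ (fun t => t.length == Ls) (by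
        intro x hx
        simp only [decide_eq_true_eq] at hx
        simp [hx.2, hrlen])]
      rw [occs_filter l Ls (by omega) hLs2]
      have hq := max?_find? (fun u => (PySem.Dict.counter (subsL l Ls)).getD u 0)
        ((PySem.Dict.counter (subsL l Ls)).keys) (tL l Ls) (tL_max? l Ls)
      rw [PySem.Dict.keys_counter, find?_ofList] at hq
      rw [find?_congr' (subsL l Ls) _
        (fun x => (PySem.Dict.counter (subsL l Ls)).getD x 0 ==
          (PySem.Dict.counter (subsL l Ls)).getD (tL l Ls) 0) ?_]
      · exact hq
      · intro x hx
        have hxlen : x.length = Ls := mem_subsL_length l Ls hLs2 x hx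
        have hxc : cOf l x = (((subsL l Ls).count x : Nat) : Int) := by
          rw [cOf_eq_count_subsL l x (by omega) (by omega), hxlen]
        simp only [PySem.Dict.getD_counter]
        by_cases hc : cOf l x = cOf l (tL l Ls)
        · have h1 : ((subsL l Ls).count x : Int) = ((subsL l Ls).count (tL l Ls) : Int) := by
            rw [← hxc, ← (by rw [cOf_eq_count_subsL l _ (by omega) (by omega), hrlen] :
              cOf l (tL l Ls) = (((subsL l Ls).count (tL l Ls) : Nat) : Int))]
            exact hc
          simp [hc, hxlen, hrlen, h1]
        · have h1 : ¬ ((subsL l Ls).count x : Int) = ((subsL l Ls).count (tL l Ls) : Int) := by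
            rw [← hxc, ← (by rw [cOf_eq_count_subsL l _ (by omega) (by omega), hrlen] :
              cOf l (tL l Ls) = (((subsL l Ls).count (tL l Ls) : Nat) : Int))]
            exact hc
          simp [hc, h1]

-- ===== VERDICT (by name: the statement is the Claim_ definition above) =====
theorem repeated_text_spec : Claim_equal_repeated_text := by
  intro s _
  unfold Spec_repeated_text repeated_text repeated_text_alt
  simp only []
  rw [mA_eq_counter s.toList]
  have h0 : ((0 : Int), ([] : List Char)) = (cOf s.toList [], ([] : List Char)) := by
    rw [cOf_nil]
  rw [h0]
  rw [selfold_eq_pick s.toList (PySem.Dict.counter (occs s.toList))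
    (fun t => by rw [PySem.Dict.getD_counter]; rfl)]
  rw [main_list_eq s.toList]
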